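-- pv_equiv track=rewrite | github.com/reiderdwien/royalur | calc.py | considerations
-- ===== SOURCE A (Python) =====
-- import math
--
-- def considerations(p,m,n,states):
--     delta_shared = 0
--     if p >= 4:
--         for p1 in range(4,min(m+n+1,p+1)):
--             delta_shared = delta_shared + 2*(p-p1+1)*math.comb(n+m-4,p1-4)
--     delta_turns = 0
--     for p1 in range(0,min(m+n+1,p+1)):
--         delta_turns = delta_turns + 2*(p-p1+1)*math.comb(n+m,p1)
--     return 2*(states) - delta_turns - delta_shared
-- ===== SOURCE B (Python) =====
-- import math
--
-- def _rowsum(M, K):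
--     # prefix sum of a binomial row: sum_{k=0}^{K} C(M, k)  (0 when K < 0)
--     return sum(math.comb(M, k) for k in range(K + 1))
--
-- def considerations(p, m, n, states):
--     # Weighted sums are eliminated algebraically: by the absorption identity
--     # k*C(M,k) = M*C(M-1,k-1),
--     #   sum_{k=0}^{K} 2*(p-k+1)*C(M,k) = 2*(p+1)*G(M,K) - 2*M*G(M-1,K-1)
--     # so only unweighted prefix row sums G are ever computed.
--     M = m + n
--     K = min(M, p)
--     turns = 2 * (p + 1) * _rowsum(M, K) - 2 * M * _rowsum(M - 1, K - 1) if K >= 0 else 0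
--     shared = 2 * (p - 3) * _rowsum(M - 4, K - 4) - 2 * (M - 4) * _rowsum(M - 5, K - 5) if K >= 4 else 0
--     return 2 * states - turns - shared
-- ===== Notes on version B (the rewrite author's own statement) =====
-- stated objective: alternative
-- what changed: B removes the linear weight from the loops altogether using the absorption identity k*C(M,k)=M*C(M-1,k-1): it only computes unweighted prefix sums of binomial rows (_rowsum) and assembles both weighted series from them by a closed formula, instead of A's loops that accumulate weighted terms 2*(p-p1+1)*comb(...).
import Mathlib
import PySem

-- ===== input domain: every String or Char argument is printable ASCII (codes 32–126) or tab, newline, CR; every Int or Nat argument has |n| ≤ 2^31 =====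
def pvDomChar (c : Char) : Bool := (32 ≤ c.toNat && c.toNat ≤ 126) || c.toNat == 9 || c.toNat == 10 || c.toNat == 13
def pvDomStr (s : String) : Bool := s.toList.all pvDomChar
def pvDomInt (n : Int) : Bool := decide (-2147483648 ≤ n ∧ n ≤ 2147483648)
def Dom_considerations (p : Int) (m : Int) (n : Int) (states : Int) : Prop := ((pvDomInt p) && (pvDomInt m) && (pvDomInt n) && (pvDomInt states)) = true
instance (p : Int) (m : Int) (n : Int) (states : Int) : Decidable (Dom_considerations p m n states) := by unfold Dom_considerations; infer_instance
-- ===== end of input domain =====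

-- B eliminates the linear weight from the loops via the absorption identity k*C(M,k) = M*C(M-1,k-1):
-- it sums only unweighted binomial row prefixes (rowsum) and assembles the answer by a formula.

-- ===== PORT A =====
-- math.comb; both Pythons only ever call it with nonnegative arguments (else the range is empty),
-- so this total variant agrees with Python on every reachable call.
def pyComb (a b : Int) : Int := (a.toNat.choose b.toNat : Int)

def considerations (p : Int) (m : Int) (n : Int) (states : Int) : Int :=
  let delta_shared : Int :=
    if p ≥ 4 then
      (PySem.List.pyRange 4 (min (m + n + 1) (p + 1)) 1).foldl
        (fun d p1 => d + 2 * (p - p1 + 1) * pyComb (n + m - 4) (p1 - 4)) 0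
    else 0
  let delta_turns : Int :=
    (PySem.List.pyRange 0 (min (m + n + 1) (p + 1)) 1).foldl
      (fun d p1 => d + 2 * (p - p1 + 1) * pyComb (n + m) p1) 0
  2 * states - delta_turns - delta_shared

-- ===== PORT B =====
-- _rowsum: unweighted prefix sum of a binomial row (0 when K < 0).
def rowsum (M : Int) (K : Int) : Int :=
  (PySem.List.pyRange 0 (K + 1) 1).foldl (fun s k => s + pyComb M k) 0

def considerations_alt (p : Int) (m : Int) (n : Int) (states : Int) : Int :=
  let M := m + n
  let K := min M p
  let turns := if 0 ≤ K then 2 * (p + 1) * rowsum M K - 2 * M * rowsum (M - 1) (K - 1) else 0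
  let shared := if 4 ≤ K then 2 * (p - 3) * rowsum (M - 4) (K - 4) - 2 * (M - 4) * rowsum (M - 5) (K - 5) else 0
  2 * states - turns - shared

-- ===== PRECONDITION & SPEC =====
def Spec_considerations (p : Int) (m : Int) (n : Int) (states : Int) (out : Int) : Prop := out = considerations_alt p m n states
instance (p : Int) (m : Int) (n : Int) (states : Int) (out : Int) : Decidable (Spec_considerations p m n states out) := by unfold Spec_considerations; infer_instance

-- ===== CLAIM (what is proved, stated in full; the proofs are below) =====
def Claim_equal_considerations : Prop := ∀ (p : Int) (m : Int) (n : Int) (states : Int), Dom_considerations p m n states → Spec_considerations p m n states (considerations p m n states)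

-- ===== LEMMAS AND PROOFS =====

-- absorption identity on binomial coefficients, in ℕ
lemma choose_absorb (M j : Nat) : (j + 1) * M.choose (j + 1) = M * (M - 1).choose j := by
  cases M with
  | zero => simp
  | succ mn =>
    simp only [Nat.succ_sub_one]
    rw [mul_comm]
    exact (Nat.add_one_mul_choose_eq mn j).symm

-- an unweighted rowsum fold equals a Finset sum of binomials
lemma rowfold (M : Int) : ∀ KN : Nat,
    (PySem.List.pyRange 0 (KN : Int) 1).foldl (fun s k => s + pyComb M k) 0
    = ∑ k ∈ Finset.range KN, (M.toNat.choose k : Int) := by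
  intro KN
  induction KN with
  | zero => simp [PySem.List.pyRange_one_eq_nil]
  | succ t ih =>
    have hb : ((t + 1 : Nat) : Int) = (t : Int) + 1 := by push_cast; ring
    rw [hb, PySem.List.pyRange_one_succ_right (by positivity), List.foldl_append]
    simp only [List.foldl_cons, List.foldl_nil]
    rw [ih, Finset.sum_range_succ]
    simp [pyComb]

lemma rowsum_eq (M K : Int) (KN : Nat) (h : K + 1 = (KN : Int)) :
    rowsum M K = ∑ k ∈ Finset.range KN, (M.toNat.choose k : Int) := by
  unfold rowsum
  rw [h, rowfold]

-- core: a weighted fold over range(lo, lo+KN) equals the formula in unweighted row sums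
lemma key (p lo M : Int) (hM : 0 ≤ M) : ∀ KN : Nat,
    (PySem.List.pyRange lo (lo + (KN : Int)) 1).foldl
        (fun d k => d + 2 * (p - k + 1) * pyComb M (k - lo)) 0
    = 2 * (p - lo + 1) * (∑ k ∈ Finset.range KN, (M.toNat.choose k : Int))
      - 2 * M * (∑ k ∈ Finset.range (KN - 1), ((M.toNat - 1).choose k : Int)) := by
  intro KN
  induction KN with
  | zero => simp [PySem.List.pyRange_one_eq_nil]
  | succ t ih =>
    have hb : lo + ((t + 1 : Nat) : Int) = (lo + (t : Int)) + 1 := by push_cast; ring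
    rw [hb, PySem.List.pyRange_one_succ_right (by omega), List.foldl_append]
    simp only [List.foldl_cons, List.foldl_nil]
    rw [ih]
    have hterm : pyComb M (lo + (t : Int) - lo) = (M.toNat.choose t : Int) := by
      simp [pyComb]
    rw [hterm, Finset.sum_range_succ]
    cases t with
    | zero => push_cast; ring
    | succ j =>
      have hsum : ∑ k ∈ Finset.range (j + 1 + 1 - 1), ((M.toNat - 1).choose k : Int)
          = (∑ k ∈ Finset.range (j + 1 - 1), ((M.toNat - 1).choose k : Int))
            + ((M.toNat - 1).choose j : Int) := by
        simp [Finset.sum_range_succ]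
      rw [hsum]
      -- integer cast of the absorption identity (0 ≤ M, so the toNat cast is exact)
      have habs2 : ((j : Int) + 1) * (M.toNat.choose (j + 1) : Int)
          = (M.toNat : Int) * ((M.toNat - 1).choose j : Int) := by
        exact_mod_cast congrArg (fun x : Nat => (x : Int)) (choose_absorb M.toNat j)
      have hMt : (M.toNat : Int) = M := by omega
      rw [hMt] at habs2
      push_cast
      linear_combination (-2 : Int) * habs2

-- the delta_turns fold equals B's turns expression
lemma turns_eq (p M : Int) :
    (PySem.List.pyRange 0 (min (M + 1) (p + 1)) 1).foldl
        (fun d k => d + 2 * (p - k + 1) * pyComb M k) 0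
    = (if 0 ≤ min M p then 2 * (p + 1) * rowsum M (min M p) - 2 * M * rowsum (M - 1) (min M p - 1) else 0) := by
  by_cases h : 0 ≤ min M p
  · rw [if_pos h]
    have hM : 0 ≤ M := le_trans h (min_le_left _ _)
    set t : Nat := (min M p).toNat with ht
    have h1 : min (M + 1) (p + 1) = 0 + ((t + 1 : Nat) : Int) := by
      push_cast
      omega
    have hk := key p 0 M hM (t + 1)
    simp only [sub_zero, zero_add] at hk h1 ⊢
    rw [h1, hk]
    rw [rowsum_eq M (min M p) (t + 1) (by omega),
        rowsum_eq (M - 1) (min M p - 1) t (by omega)]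
    have h2 : (M - 1).toNat = M.toNat - 1 := by omega
    simp [h2]
  · rw [if_neg h]
    have : min (M + 1) (p + 1) ≤ 0 := by omega
    rw [PySem.List.pyRange_one_eq_nil this]
    rfl

-- the delta_shared branch equals B's shared expression
lemma shared_eq (p M : Int) :
    (if p ≥ 4 then
      (PySem.List.pyRange 4 (min (M + 1) (p + 1)) 1).foldl
        (fun d k => d + 2 * (p - k + 1) * pyComb (M - 4) (k - 4)) 0
     else 0)
    = (if 4 ≤ min M p then
        2 * (p - 3) * rowsum (M - 4) (min M p - 4) - 2 * (M - 4) * rowsum (M - 5) (min M p - 5)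
       else 0) := by
  by_cases h : 4 ≤ min M p
  · have hp : p ≥ 4 := le_trans h (min_le_right _ _)
    rw [if_pos hp, if_pos h]
    set t : Nat := ((min M p).toNat - 4) with ht
    have h1 : min (M + 1) (p + 1) = 4 + ((t + 1 : Nat) : Int) := by
      push_cast
      omega
    have hk := key p 4 (M - 4) (by omega) (t + 1)
    rw [h1, hk]
    rw [rowsum_eq (M - 4) (min M p - 4) (t + 1) (by omega),
        rowsum_eq (M - 5) (min M p - 5) t (by omega)]
    have h2 : (M - 5).toNat = (M - 4).toNat - 1 := by omega
    have h3 : p - 4 + 1 = p - 3 := by ring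
    simp [h2, h3]
  · rw [if_neg h]
    by_cases hp : p ≥ 4
    · rw [if_pos hp]
      have : min (M + 1) (p + 1) ≤ 4 := by omega
      rw [PySem.List.pyRange_one_eq_nil this]
      rfl
    · rw [if_neg hp]

-- ===== VERDICT (by name: the statement is the Claim_ definition above) =====
theorem considerations_spec : Claim_equal_considerations := by
  intro p m n states _
  unfold Spec_considerations considerations considerations_alt
  simp only [add_comm n m]
  rw [turns_eq p (m + n), shared_eq p (m + n)]
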